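-- pv_equiv track=rewrite | github.com/jfzazo/pokeemerald-rogue_savconverter | pokeemerald-rogue_savconverter.py | bagItemsToVersion2
-- ===== SOURCE A (Python) =====
-- def bagItemsToVersion2(il):
--     """
--     Given a list of objects (array of dicts in the form {id, quantity}), return a filtered list
--     that can be injected to a 2.0 sav file format
--     """
--     ## The items must be sorted by the pocket they are located. Otherwise they are not copied.
--     ## At the current moment only the *pokeballs* and *general items/medicines* are being copied
--     ## Pokeball pocket
--     FIRST_BALL_V2 = 1
--     LAST_BALL_V2  = 28
--     FIRST_BALL_V1 = 1
--     LAST_BALL_V1  = 27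
--
--     ## Items pocket
--     FIRST_MEDICINE_V2 = 39
--     LAST_MEDICINE_V2  = 67
--     LAST_EVOLUTION_V2  = 256
--     FIRST_MEDICINE_V1 = 28
--     LAST_MEDICINE_V1  = 56
--
--     ## Berries pocket
--     FIRST_BERRY_V2 = 525
--     LAST_BERRY_V2  = 592
--     FIRST_BERRY_V1 = 514
--     LAST_BERRY_V1  = 581
--     ## TMHM Pocket
--     FIRST_TMHM_V2 = 593
--     LAST_TMHM_V2  = 700
--     FIRST_TMHM_V1 = 582
--     LAST_TMHM_V1  = 689
--
--     for el in il:
--         if el['id']>LAST_BALL_V1: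
--             el['id']+=11
--     sorted_array = sorted(il, key=lambda x: x['id'])
--     filtered_array = []
--     # Items pocket
--     filtered_array += [d for d in sorted_array if (d['id']>LAST_BALL_V2 and d['id'] <= LAST_EVOLUTION_V2)]
--     # Pokeball pocket
--     filtered_array += [d for d in sorted_array if (d['id']<=LAST_BALL_V2)]
--     # TMHM pocket
--     # filtered_array += [d for d in sorted_array if (d['id']>=FIRST_TMHM_V2 and d['id'] <= LAST_TMHM_V2)]
--     return filtered_array
-- ===== SOURCE B (Python) =====
-- def bagItemsToVersion2(il):
--     # Same in-place remap as A (the caller-visible mutation is preserved),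
--     # then one pass partitions into the two pockets, each sorted separately.
--     for el in il:
--         if el['id'] > 27:
--             el['id'] += 11
--     items = []
--     balls = []
--     for el in il:
--         if 28 < el['id'] <= 256:
--             items.append(el)
--         elif el['id'] <= 28:
--             balls.append(el)
--     return sorted(items, key=lambda x: x['id']) + sorted(balls, key=lambda x: x['id'])
-- ===== Notes on version B (the rewrite author's own statement) =====
-- stated objective: alternative
-- what changed: A sorts the whole mutated list once and then filters it twice; B partitions the mutated list in one pass into the items and pokeball pockets and sorts each pocket separately, relying on sort stability for equal ids.
import Mathlib
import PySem

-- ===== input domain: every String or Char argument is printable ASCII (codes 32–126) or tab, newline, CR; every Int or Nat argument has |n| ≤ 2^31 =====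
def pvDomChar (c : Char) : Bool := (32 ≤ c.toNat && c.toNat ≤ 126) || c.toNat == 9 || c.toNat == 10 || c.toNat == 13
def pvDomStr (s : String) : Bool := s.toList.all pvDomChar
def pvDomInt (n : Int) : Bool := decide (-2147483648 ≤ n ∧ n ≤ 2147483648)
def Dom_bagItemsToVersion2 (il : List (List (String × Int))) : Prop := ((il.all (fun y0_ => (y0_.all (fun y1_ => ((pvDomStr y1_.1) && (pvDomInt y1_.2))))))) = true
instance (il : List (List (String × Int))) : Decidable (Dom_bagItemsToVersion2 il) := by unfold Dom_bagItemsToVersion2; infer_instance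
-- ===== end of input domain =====

-- B partitions the mutated list in one pass into the two pockets and sorts each pocket
-- separately, instead of A's sort-whole-list-then-filter-twice (alternative decomposition,
-- same asymptotic cost). Equivalence is about the RETURN value; both Pythons perform the
-- same in-place += 11 mutation of the argument's dicts.

-- ===== PORT A =====
-- el['id'] (both Pythons only read it where Pre_ guarantees the key exists)
def pvGetId (el : List (String × Int)) : Int := (PySem.Dict.mk el).getD "id" 0

-- the body of A's first loop: el['id'] += 11 when el['id'] > 27 (overwrite keeps position)
def pvBump (el : List (String × Int)) : List (String × Int) :=
  if pvGetId el > 27 then ((PySem.Dict.mk el).insert "id" (pvGetId el + 11)).items else el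

def bagItemsToVersion2 (il : List (List (String × Int))) : List (List (String × Int)) :=
  let il2 := il.map pvBump
  let sorted_array := PySem.List.sorted il2 (fun x => pvGetId x)
  let filtered_array : List (List (String × Int)) := []
  let filtered_array := filtered_array ++ sorted_array.filter (fun d => 28 < pvGetId d && pvGetId d ≤ 256)
  let filtered_array := filtered_array ++ sorted_array.filter (fun d => pvGetId d ≤ 28)
  filtered_array

-- ===== PORT B =====
def bagItemsToVersion2_alt (il : List (List (String × Int))) : List (List (String × Int)) :=
  let il2 := il.map pvBump
  let ib := il2.foldl (fun (acc : List (List (String × Int)) × List (List (String × Int))) el =>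
      if 28 < pvGetId el && pvGetId el ≤ 256 then (acc.1 ++ [el], acc.2)
      else if pvGetId el ≤ 28 then (acc.1, acc.2 ++ [el]) else acc) ([], [])
  PySem.List.sorted ib.1 (fun x => pvGetId x) ++ PySem.List.sorted ib.2 (fun x => pvGetId x)

-- ===== PRECONDITION & SPEC =====
-- Pre_ excludes exactly the inputs where a dict lacks the key 'id': there A raises KeyError.
def Pre_bagItemsToVersion2 (il : List (List (String × Int))) : Prop :=
  ∀ el ∈ il, (PySem.Dict.mk el).contains "id" = true
instance (il : List (List (String × Int))) : Decidable (Pre_bagItemsToVersion2 il) := by unfold Pre_bagItemsToVersion2; infer_instance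

def pvWitness_bagItemsToVersion2 : (List (List (String × Int))) := [[("id", 5)], [("id", 40)]]

def Spec_bagItemsToVersion2 (il : List (List (String × Int))) (out : List (List (String × Int))) : Prop := out = bagItemsToVersion2_alt il
instance (il : List (List (String × Int))) (out : List (List (String × Int))) : Decidable (Spec_bagItemsToVersion2 il out) := by unfold Spec_bagItemsToVersion2; infer_instance

-- ===== CLAIM (what is proved, stated in full; the proofs are below) =====
def Claim_equal_bagItemsToVersion2 : Prop := ∀ (il : List (List (String × Int))), Dom_bagItemsToVersion2 il → Pre_bagItemsToVersion2 il → Spec_bagItemsToVersion2 il (bagItemsToVersion2 il)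

-- ===== LEMMAS AND PROOFS =====

-- inserting an element that is strictly below everything already present puts it in front
theorem insertBy_cons_of_lt {α : Type} (key : α → Int) (x : α) (l : List α)
    (h : ∀ z ∈ l, key x < key z) :
    PySem.List.insertBy (fun a b => decide (key a < key b)) x l = x :: l := by
  cases l with
  | nil => rfl
  | cons y ys => simp [PySem.List.insertBy, h y (by simp)]

-- filtering commutes with a single stable insertion into a key-sorted list
theorem filter_insertBy {α : Type} (key : α → Int) (p : α → Bool) (x : α) (ys : List α)
    (hs : ys.Pairwise (fun a b => key a ≤ key b)) :
    (PySem.List.insertBy (fun a b => decide (key a < key b)) x ys).filter p =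
      if p x then PySem.List.insertBy (fun a b => decide (key a < key b)) x (ys.filter p)
      else ys.filter p := by
  induction ys with
  | nil => cases hpx : p x <;> simp [PySem.List.insertBy, hpx]
  | cons y ys ih =>
    rcases List.pairwise_cons.mp hs with ⟨hy, hys⟩
    by_cases hlt : key x < key y
    · have hfr : ∀ z ∈ (y :: ys).filter p, key x < key z := by
        intro z hz
        rcases List.mem_filter.mp hz with ⟨hz, _⟩
        rcases List.mem_cons.mp hz with h | h
        · exact h ▸ hlt
        · exact lt_of_lt_of_le hlt (hy z h)
      rw [show PySem.List.insertBy (fun a b => decide (key a < key b)) x (y :: ys)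
            = x :: y :: ys by simp [PySem.List.insertBy, hlt]]
      cases hpx : p x
      · simp [List.filter, hpx]
      · rw [insertBy_cons_of_lt key x _ hfr]
        simp [List.filter, hpx]
    · rw [show PySem.List.insertBy (fun a b => decide (key a < key b)) x (y :: ys)
            = y :: PySem.List.insertBy (fun a b => decide (key a < key b)) x ys by
          simp [PySem.List.insertBy, hlt]]
      cases hpx : p x <;> cases hpy : p y <;>
        simp [List.filter, hpx, hpy, ih hys, PySem.List.insertBy, hlt]

theorem sorted_snoc {α : Type} (key : α → Int) (l : List α) (x : α) :
    PySem.List.sorted (l ++ [x]) key =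
      PySem.List.insertBy (fun a b => decide (key a < key b)) x (PySem.List.sorted l key) := by
  rw [PySem.List.sorted_eq_foldl_insertBy, PySem.List.sorted_eq_foldl_insertBy,
    List.foldl_append]
  rfl

-- filtering commutes with Python's stable sort
theorem filter_sorted {α : Type} (key : α → Int) (p : α → Bool) (xs : List α) :
    (PySem.List.sorted xs key).filter p = PySem.List.sorted (xs.filter p) key := by
  induction xs using List.reverseRecOn with
  | nil => rfl
  | append_singleton l x ih =>
    rw [sorted_snoc, filter_insertBy key p x _ (PySem.List.sorted_pairwise l key),
      List.filter_append]
    cases hpx : p x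
    · simpa [hpx] using ih
    · simp only [List.filter_cons, hpx, List.filter_nil]
      rw [ih, ← sorted_snoc]
      simp

-- B's single partitioning pass computes the two filters of A
theorem fold_partition (l : List (List (String × Int)))
    (its bls : List (List (String × Int))) :
    l.foldl (fun (acc : List (List (String × Int)) × List (List (String × Int))) el =>
        if 28 < pvGetId el && pvGetId el ≤ 256 then (acc.1 ++ [el], acc.2)
        else if pvGetId el ≤ 28 then (acc.1, acc.2 ++ [el]) else acc) (its, bls) =
      (its ++ l.filter (fun d => 28 < pvGetId d && pvGetId d ≤ 256),
       bls ++ l.filter (fun d => pvGetId d ≤ 28)) := by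
  induction l generalizing its bls with
  | nil => simp
  | cons e l ih =>
    simp only [List.foldl_cons, List.filter_cons]
    by_cases h1 : 28 < pvGetId e
    · by_cases h2 : pvGetId e ≤ 256
      · rw [if_pos (by simp [h1, h2]), ih]
        have h3 : ¬ pvGetId e ≤ 28 := by omega
        simp [h1, h2, h3]
      · rw [if_neg (by simp [h2])]
        have h3 : ¬ pvGetId e ≤ 28 := by omega
        rw [if_neg (by simpa using h3), ih]
        simp [h2, h3]
    · rw [if_neg (by simp [h1])]
      have h2 : pvGetId e ≤ 28 := by omega
      rw [if_pos (by simpa using h2), ih]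
      simp [h1, h2]

-- ===== VERDICT (by name: the statement is the Claim_ definition above) =====
theorem bagItemsToVersion2_spec : Claim_equal_bagItemsToVersion2 := by
  intro il _ _
  show bagItemsToVersion2 il = bagItemsToVersion2_alt il
  unfold bagItemsToVersion2 bagItemsToVersion2_alt
  simp only [fold_partition, List.nil_append, filter_sorted]
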